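-- pv_equiv track=rewrite | github.com/mminus0707/Year-12-13-worthwhile-codes | main (12).py | cdict
-- ===== SOURCE A (Python) =====
-- def cdict(sentence):
--   newthis = []
--   dictionary = []
--   save = 0
--   for x in range(0,len(sentence)):
--     if sentence[x] == " " or x == len(sentence)-1:
--       slic = slice(save,x)
--       newthis.append(sentence[slic])
--       save = x + 1
--   for y in range(0,len(newthis)):
--     count = 0
--     for z in range(0,len(newthis)):
--       if newthis[y] == newthis[z]:
--         count += 1
--     if count > 1:
--       if newthis[y] not in dictionary:
--         dictionary.append(newthis[y])
--   total = 0
--   for i in range(0,len(dictionary)):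
--     for o in range(0,len(dictionary[i])):
--       total += 1
--   return total
-- ===== SOURCE B (Python) =====
-- def cdict(sentence):
--     # same quirky splitter as the original (drops the last character of the
--     # final word, can produce empty tokens); then one counting pass over a
--     # dict instead of the nested scan + dedup list.
--     words = []
--     save = 0
--     for x in range(0, len(sentence)):
--         if sentence[x] == " " or x == len(sentence) - 1:
--             words.append(sentence[save:x])
--             save = x + 1
--     counts = {}
--     for w in words:
--         counts[w] = counts.get(w, 0) + 1
--     total = 0
--     for w, c in counts.items():
--         if c > 1:
--             total += len(w)
--     return total
-- ===== Notes on version B (the rewrite author's own statement) =====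
-- stated objective: alternative
-- what changed: A's nested duplicate scan plus dedup-list plus per-character length loop is replaced by one counting-dict pass over the words and a single sum over its items (the quirky splitter pass is kept verbatim).
import Mathlib
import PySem

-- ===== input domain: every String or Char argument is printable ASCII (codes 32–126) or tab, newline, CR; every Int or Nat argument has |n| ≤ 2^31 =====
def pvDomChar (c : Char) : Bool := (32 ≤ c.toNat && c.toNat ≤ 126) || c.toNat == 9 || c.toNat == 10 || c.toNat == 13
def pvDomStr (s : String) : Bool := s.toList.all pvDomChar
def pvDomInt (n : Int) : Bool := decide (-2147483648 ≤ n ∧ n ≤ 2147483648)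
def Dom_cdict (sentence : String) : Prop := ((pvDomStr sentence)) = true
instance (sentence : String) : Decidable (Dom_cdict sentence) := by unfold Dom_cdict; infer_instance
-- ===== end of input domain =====

-- B replaces A's nested duplicate scan + dedup list with a single counting-dict pass
-- and one sum over its items (alternative algorithm); the quirky splitter is kept verbatim.

-- ===== PORT A =====
def cdict (sentence : String) : Int :=
  let cs := sentence.toList
  let st := (PySem.List.pyRange 0 (PySem.Str.len sentence) 1).foldl
      (fun (st : List (List Char) × Int) x =>
        if PySem.List.pyGetD cs x ' ' = ' ' ∨ x = PySem.Str.len sentence - 1 then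
          (st.1 ++ [PySem.List.slice cs st.2 x], x + 1)
        else st) ([], 0)
  let newthis := st.1
  let dictionary := (PySem.List.pyRange 0 (newthis.length : Int) 1).foldl
      (fun (dict : List (List Char)) y =>
        let count := (PySem.List.pyRange 0 (newthis.length : Int) 1).foldl
            (fun (c : Int) z =>
              if PySem.List.pyGetD newthis y [] = PySem.List.pyGetD newthis z [] then c + 1
              else c) 0
        if count > 1 then
          (if PySem.List.pyGetD newthis y [] ∉ dict then dict ++ [PySem.List.pyGetD newthis y []]
           else dict)
        else dict) []
  (PySem.List.pyRange 0 (dictionary.length : Int) 1).foldl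
      (fun (total : Int) i =>
        (PySem.List.pyRange 0 ((PySem.List.pyGetD dictionary i []).length : Int) 1).foldl
          (fun t _ => t + 1) total) 0

-- ===== PORT B =====
def cdict_alt (sentence : String) : Int :=
  let cs := sentence.toList
  let st := (PySem.List.pyRange 0 (PySem.Str.len sentence) 1).foldl
      (fun (st : List (List Char) × Int) x =>
        if PySem.List.pyGetD cs x ' ' = ' ' ∨ x = PySem.Str.len sentence - 1 then
          (st.1 ++ [PySem.List.slice cs st.2 x], x + 1)
        else st) ([], 0)
  let words := st.1
  let counts := words.foldl (fun (d : PySem.Dict (List Char) Int) w => d.insert w (d.getD w 0 + 1))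
      PySem.Dict.empty
  counts.items.foldl (fun (total : Int) p => if p.2 > 1 then total + (p.1.length : Int) else total) 0

-- ===== PRECONDITION & SPEC =====
def Spec_cdict (sentence : String) (out : Int) : Prop := out = cdict_alt sentence
instance (sentence : String) (out : Int) : Decidable (Spec_cdict sentence out) := by unfold Spec_cdict; infer_instance

-- ===== CLAIM (what is proved, stated in full; the proofs are below) =====
def Claim_equal_cdict : Prop := ∀ (sentence : String), Dom_cdict sentence → Spec_cdict sentence (cdict sentence)

-- ===== LEMMAS AND PROOFS =====


theorem pvAdd_filter {α : Type} [BEq α] [LawfulBEq α] (p : α → Bool) (acc : List α) (x : α) :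
    (PySem.Set.add acc x).filter p = if p x then PySem.Set.add (acc.filter p) x else acc.filter p := by
  by_cases hm : x ∈ acc
  · by_cases hp : p x = true
    · have hmf : x ∈ acc.filter p := List.mem_filter.2 ⟨hm, hp⟩
      simp [PySem.Set.add, PySem.Set.contains, hm, hp, hmf]
    · simp [PySem.Set.add, PySem.Set.contains, hm, hp]
  · have hnf : x ∉ acc.filter p := fun h => hm (List.mem_filter.1 h).1
    by_cases hp : p x = true
    · simp [PySem.Set.add, PySem.Set.contains, hm, hp, hnf, List.filter_append]
    · simp [PySem.Set.add, PySem.Set.contains, hm, hp, List.filter_append]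

theorem pvFoldl_add_filter {α : Type} [BEq α] [LawfulBEq α] (p : α → Bool) :
    ∀ (ws acc : List α),
      (ws.filter p).foldl PySem.Set.add (acc.filter p) = (ws.foldl PySem.Set.add acc).filter p := by
  intro ws
  induction ws with
  | nil => intro acc; rfl
  | cons x t ih =>
    intro acc
    have key := ih (PySem.Set.add acc x)
    by_cases hp : p x = true
    · simp only [List.filter_cons, hp, if_true, List.foldl_cons]
      rw [← key, pvAdd_filter p acc x, if_pos hp]
    · simp only [List.filter_cons, hp, List.foldl_cons]
      rw [← key, pvAdd_filter p acc x]; simp [hp]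

theorem pvOfList_filter {α : Type} [BEq α] [LawfulBEq α] (p : α → Bool) (ws : List α) :
    PySem.Set.ofList (ws.filter p) = (PySem.Set.ofList ws).filter p := by
  rw [PySem.Set.ofList_eq_foldl, PySem.Set.ofList_eq_foldl]
  simpa using pvFoldl_add_filter p ws []

theorem pvFoldl_len {α : Type} (l : List α) (t : Int) :
    l.foldl (fun t _ => t + 1) t = t + (l.length : Int) := by
  induction l generalizing t with
  | nil => simp
  | cons x s ih => simp [ih]; ring

theorem pvCount (w : List Char) (ws : List (List Char)) :
    List.countP (fun u => decide (w = u)) ws = ws.count w := by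
  rw [List.count_eq_countP']
  refine List.countP_congr (fun u _ => ?_)
  by_cases h : w = u
  · subst h; simp
  · simp [h]; exact fun hh => h hh.symm

theorem pvIfNotMem_add (d : List (List Char)) (w : List Char) :
    (if w ∉ d then d ++ [w] else d) = PySem.Set.add d w := by
  simp [PySem.Set.add, PySem.Set.contains]

theorem pvRangeCount (m : Nat) (t : Int) :
    (PySem.List.pyRange 0 (m : Int) 1).foldl (fun t _ => t + 1) t = t + (m : Int) := by
  rw [pvFoldl_len]
  simp [PySem.List.length_pyRange_one]

theorem pvPhase (ws : List (List Char)) :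
    (PySem.List.pyRange 0
        ((((PySem.List.pyRange 0 (ws.length : Int) 1).foldl
            (fun (dict : List (List Char)) y =>
              if ((PySem.List.pyRange 0 (ws.length : Int) 1).foldl
                  (fun (c : Int) z =>
                    if PySem.List.pyGetD ws y [] = PySem.List.pyGetD ws z [] then c + 1 else c) 0) > 1 then
                (if PySem.List.pyGetD ws y [] ∉ dict then dict ++ [PySem.List.pyGetD ws y []] else dict)
              else dict) []).length : Int)) 1).foldl
      (fun (total : Int) i =>
        (PySem.List.pyRange 0
            (((PySem.List.pyGetD
                ((PySem.List.pyRange 0 (ws.length : Int) 1).foldl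
                  (fun (dict : List (List Char)) y =>
                    if ((PySem.List.pyRange 0 (ws.length : Int) 1).foldl
                        (fun (c : Int) z =>
                          if PySem.List.pyGetD ws y [] = PySem.List.pyGetD ws z [] then c + 1 else c) 0) > 1 then
                      (if PySem.List.pyGetD ws y [] ∉ dict then dict ++ [PySem.List.pyGetD ws y []] else dict)
                    else dict) []) i []).length : Int)) 1).foldl
          (fun t _ => t + 1) total) 0
    =
    (ws.foldl (fun (d : PySem.Dict (List Char) Int) w => d.insert w (d.getD w 0 + 1))
        PySem.Dict.empty).items.foldl
      (fun (total : Int) p => if p.2 > 1 then total + (p.1.length : Int) else total) 0 := by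
  rw [PySem.Dict.foldl_insert_getD_add_one_eq_counter, PySem.Dict.items_counter, List.foldl_map]
  rw [PySem.List.foldl_pyRange_zero_pyGetD' ws []
        (fun (dict : List (List Char)) w =>
          if ((PySem.List.pyRange 0 (ws.length : Int) 1).foldl
              (fun (c : Int) z => if w = PySem.List.pyGetD ws z [] then c + 1 else c) 0) > 1 then
            (if w ∉ dict then dict ++ [w] else dict)
          else dict) []]
  have hbody : ∀ (dict : List (List Char)) (w : List Char), w ∈ ws →
      (if ((PySem.List.pyRange 0 (ws.length : Int) 1).foldl
            (fun (c : Int) z => if w = PySem.List.pyGetD ws z [] then c + 1 else c) 0) > 1 then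
          (if w ∉ dict then dict ++ [w] else dict)
        else dict)
      = (if ((ws.count w : Int)) > 1 then PySem.Set.add dict w else dict) := by
    intro dict w _
    rw [PySem.List.foldl_pyRange_zero_pyGetD' ws []
        (fun (c : Int) u => if w = u then c + 1 else c) 0,
      PySem.List.foldl_ite_add_one (fun u => w = u) ws 0, pvCount, pvIfNotMem_add]
    simp
  have hdict := PySem.List.foldl_congr_mem (l := ws) (init := ([] : List (List Char)))
      (f := fun (dict : List (List Char)) w =>
        if ((PySem.List.pyRange 0 (ws.length : Int) 1).foldl
            (fun (c : Int) z => if w = PySem.List.pyGetD ws z [] then c + 1 else c) 0) > 1 then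
          (if w ∉ dict then dict ++ [w] else dict)
        else dict)
      (g := fun (dict : List (List Char)) w =>
        if ((ws.count w : Int)) > 1 then PySem.Set.add dict w else dict)
      hbody
  rw [PySem.List.foldl_ite_eq_foldl_filter (fun w => ((ws.count w : Int)) > 1)
        (fun dict w => PySem.Set.add dict w) ws [],
      ← PySem.Set.ofList_eq_foldl, pvOfList_filter] at hdict
  rw [hdict,
    PySem.List.foldl_pyRange_zero_pyGetD'
      (List.filter (fun x => decide ((List.count x ws : Int) > 1)) (PySem.Set.ofList ws)) []
      (fun (total : Int) w =>
        (PySem.List.pyRange 0 (w.length : Int) 1).foldl (fun t _ => t + 1) total) 0,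
    ]
  simp only [pvRangeCount]
  rw [PySem.List.foldl_add _ (fun (w : List Char) => (w.length : Int))]
  have hrhs : (fun (x : Int) (y : List Char) =>
        if ((y, (List.count y ws : Int)).2 > 1) then x + ((y, (List.count y ws : Int)).1.length : Int) else x)
      = fun (x : Int) (y : List Char) => if ((List.count y ws : Int)) > 1 then x + (y.length : Int) else x := rfl
  rw [hrhs,
    PySem.List.foldl_ite_eq_foldl_filter (fun (y : List Char) => ((List.count y ws : Int)) > 1)
      (fun (x : Int) (y : List Char) => x + (y.length : Int)),
    PySem.List.foldl_add _ (fun (w : List Char) => (w.length : Int))]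

-- ===== VERDICT (by name: the statement is the Claim_ definition above) =====
theorem cdict_spec : Claim_equal_cdict := by
  intro sentence _
  show cdict sentence = cdict_alt sentence
  simp only [cdict, cdict_alt]
  exact pvPhase _
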